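-- pv_equiv track=rewrite | github.com/crpereir/uni-projects-repo | CD/M2/CD_41D_Grupo3/ex1_bii.py | interleaving
-- ===== SOURCE A (Python) =====
-- def interleaving(seqOfChars, matrizSize):
--     mx = []
--     elem = 0
--     i = 0
--     y = 0
--     while i < matrizSize:
--         linha = []
--         y = 0
--         while y < matrizSize:
--             if len(seqOfChars) > elem:
--                 linha.append(seqOfChars[elem])
--             else:
--                 linha.append(' ')
--             elem += 1
--             y += 1
--         mx.append(linha)
--         i += 1
--     i = 0
--     y = 0
--     res = ""
--     while i < matrizSize:
--         y = 0
--         while y < matrizSize: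
--             if len(seqOfChars) > len(res):
--                 res = res + mx[y][i]
--             y += 1
--         i += 1
--     return res
-- ===== SOURCE B (Python) =====
-- def interleaving(seqOfChars, matrizSize):
--     if matrizSize <= 0:
--         return ""
--     n = len(seqOfChars)
--     m = matrizSize
--     total = min(n, m * m)
--     return "".join(
--         seqOfChars[(k % m) * m + k // m] if (k % m) * m + k // m < n else ' '
--         for k in range(total)
--     )
-- ===== Notes on version B (the rewrite author's own statement) =====
-- stated objective: faster
-- what changed: B drops A's explicit matrizSize x matrizSize matrix build and nested column-reading loops, computing each output character directly by index arithmetic (k%m)*m+k//m over exactly min(len(seqOfChars), m^2) positions.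
import Mathlib
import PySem

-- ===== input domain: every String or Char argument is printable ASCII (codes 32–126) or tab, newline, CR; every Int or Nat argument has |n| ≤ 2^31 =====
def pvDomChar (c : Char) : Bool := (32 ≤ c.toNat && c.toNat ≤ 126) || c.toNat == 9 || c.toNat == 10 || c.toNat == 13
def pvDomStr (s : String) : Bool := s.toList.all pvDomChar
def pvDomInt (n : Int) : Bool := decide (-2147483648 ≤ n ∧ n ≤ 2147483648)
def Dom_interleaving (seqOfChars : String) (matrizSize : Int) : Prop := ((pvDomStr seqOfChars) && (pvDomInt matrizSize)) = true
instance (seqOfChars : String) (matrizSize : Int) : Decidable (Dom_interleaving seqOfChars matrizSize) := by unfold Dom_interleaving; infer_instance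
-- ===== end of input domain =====

-- B replaces A's build-matrix-then-read-columns double pass by direct index arithmetic,
-- emitting exactly min(len(seqOfChars), matrizSize^2) characters (objective: faster).

-- ===== PORT A =====
-- inner while over y building one row `linha`; indices taken only when in range
def pvA_buildRow (s : List Char) : Nat → Nat → List Char
  | _, 0 => []
  | elem, c+1 => (if s.length > elem then s.getD elem ' ' else ' ') :: pvA_buildRow s (elem+1) c

-- outer while over i building `mx`; after each row, elem has advanced by matrizSize
def pvA_buildMx (s : List Char) (m : Nat) : Nat → Nat → List (List Char)
  | 0, _ => []
  | r+1, elem => pvA_buildRow s elem m :: pvA_buildMx s m r (elem + m)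

-- second phase inner while over y; mx[y][i] is always in range when taken (getD default unused)
def pvA_inner (n : Nat) (mx : List (List Char)) (i : Nat) : Nat → Nat → List Char → List Char
  | 0, _, res => res
  | c+1, y, res =>
      pvA_inner n mx i c (y+1) (if n > res.length then res ++ [(mx.getD y []).getD i ' '] else res)

-- second phase outer while over i
def pvA_outer (n : Nat) (mx : List (List Char)) (m : Nat) : Nat → Nat → List Char → List Char
  | 0, _, res => res
  | c+1, i, res => pvA_outer n mx m c (i+1) (pvA_inner n mx i m 0 res)

def interleaving (seqOfChars : String) (matrizSize : Int) : String :=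
  let s := seqOfChars.toList
  let m := matrizSize.toNat        -- both while-loops run matrizSize times (0 if negative)
  let mx := pvA_buildMx s m m 0
  String.ofList (pvA_outer s.length mx m m 0 [])

-- ===== PORT B =====
def pvB_char (s : List Char) (m : Nat) (k : Nat) : Char :=
  let idx := (k % m) * m + k / m
  if idx < s.length then s.getD idx ' ' else ' '

def interleaving_alt (seqOfChars : String) (matrizSize : Int) : String :=
  if matrizSize ≤ 0 then ""
  else
    let s := seqOfChars.toList
    let m := matrizSize.toNat
    String.ofList ((List.range (min s.length (m * m))).map (pvB_char s m))

-- ===== PRECONDITION & SPEC =====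
def Spec_interleaving (seqOfChars : String) (matrizSize : Int) (out : String) : Prop := out = interleaving_alt seqOfChars matrizSize
instance (seqOfChars : String) (matrizSize : Int) (out : String) : Decidable (Spec_interleaving seqOfChars matrizSize out) := by unfold Spec_interleaving; infer_instance

-- ===== CLAIM (what is proved, stated in full; the proofs are below) =====
def Claim_equal_interleaving : Prop := ∀ (seqOfChars : String) (matrizSize : Int), Dom_interleaving seqOfChars matrizSize → Spec_interleaving seqOfChars matrizSize (interleaving seqOfChars matrizSize)

-- ===== LEMMAS AND PROOFS =====

-- the char placed at flat position j of the row-filled matrix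
def pvCell (s : List Char) (j : Nat) : Char := if j < s.length then s.getD j ' ' else ' '

theorem pvA_buildRow_eq (s : List Char) : ∀ (c elem : Nat),
    pvA_buildRow s elem c = (List.range c).map (fun y => pvCell s (elem + y)) := by
  intro c
  induction c with
  | zero => intro elem; simp [pvA_buildRow]
  | succ c ih =>
    intro elem
    rw [List.range_succ_eq_map]
    simp only [pvA_buildRow, List.map_cons, List.map_map]
    rw [ih (elem+1)]
    congr 1
    apply List.map_congr_left
    intro y _
    show pvCell s (elem + 1 + y) = pvCell s (elem + Nat.succ y)
    congr 1
    omega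

theorem pvA_mx_get (s : List Char) (m : Nat) : ∀ (r elem y i : Nat), y < r → i < m →
    ((pvA_buildMx s m r elem).getD y []).getD i ' ' = pvCell s (elem + (y * m + i)) := by
  intro r
  induction r with
  | zero => intro elem y i hy hi; omega
  | succ r ih =>
    intro elem y i hy hi
    cases y with
    | zero =>
      simp only [pvA_buildMx, List.getD, List.getElem?_cons_zero, Option.getD_some,
        pvA_buildRow_eq]
      simp [hi]
    | succ y =>
      have h : ((pvA_buildMx s m (r+1) elem).getD (y+1) []) = (pvA_buildMx s m r (elem+m)).getD y [] := by
        simp [pvA_buildMx, List.getD]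
      rw [h, ih (elem+m) y i (by omega) hi]
      congr 1
      ring

theorem pvA_inner_eq (s : List Char) (m : Nat) (mx : List (List Char))
    (hmx : ∀ y i, y < m → i < m → (mx.getD y []).getD i ' ' = pvCell s (y * m + i)) :
    ∀ (c y i : Nat) (res : List Char), y + c ≤ m → i < m →
    res = (List.range (min (i * m + y) s.length)).map (pvB_char s m) →
    pvA_inner s.length mx i c y res
      = (List.range (min (i * m + y + c) s.length)).map (pvB_char s m) := by
  intro c
  induction c with
  | zero => intro y i res _ _ hres; simpa [pvA_inner] using hres
  | succ c ih =>
    intro y i res hy hi hres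
    have hm : 0 < m := by omega
    have hym : y < m := by omega
    simp only [pvA_inner]
    have hmod : (i * m + y) % m = y := by
      rw [Nat.add_comm, Nat.mul_comm, Nat.add_mul_mod_self_left, Nat.mod_eq_of_lt hym]
    have hdiv : (i * m + y) / m = i := by
      rw [Nat.add_comm, Nat.mul_comm i m, Nat.add_mul_div_left _ _ hm, Nat.div_eq_of_lt hym, Nat.zero_add]
    have hlen : res.length = min (i * m + y) s.length := by
      rw [hres, List.length_map, List.length_range]
    have hres' : (if s.length > res.length then res ++ [(mx.getD y []).getD i ' '] else res)
        = (List.range (min (i * m + y + 1) s.length)).map (pvB_char s m) := by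
      by_cases hlt : i * m + y < s.length
      · rw [if_pos (by omega), hmx y i hym hi, hres]
        have h1 : min (i * m + y) s.length = i * m + y := by omega
        have h2 : min (i * m + y + 1) s.length = i * m + y + 1 := by omega
        rw [h1, h2, List.range_succ, List.map_append, List.map_cons, List.map_nil]
        congr 2
        simp only [pvB_char, pvCell, hmod, hdiv]
      · rw [if_neg (by omega), hres]
        congr 2
        omega
    rw [show i * m + y + (c + 1) = i * m + (y + 1) + c from by omega]
    exact ih (y+1) i _ (by omega) hi hres'

theorem pvA_outer_eq (s : List Char) (m : Nat) (mx : List (List Char))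
    (hmx : ∀ y i, y < m → i < m → (mx.getD y []).getD i ' ' = pvCell s (y * m + i)) :
    ∀ (c i : Nat) (res : List Char), i + c ≤ m →
    res = (List.range (min (i * m) s.length)).map (pvB_char s m) →
    pvA_outer s.length mx m c i res
      = (List.range (min ((i + c) * m) s.length)).map (pvB_char s m) := by
  intro c
  induction c with
  | zero => intro i res _ hres; simpa [pvA_outer] using hres
  | succ c ih =>
    intro i res hc hres
    simp only [pvA_outer]
    have hi : i < m := by omega
    have h1 : pvA_inner s.length mx i m 0 res
        = (List.range (min (i * m + 0 + m) s.length)).map (pvB_char s m) :=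
      pvA_inner_eq s m mx hmx m 0 i res (by omega) hi (by simpa using hres)
    rw [show i + (c + 1) = (i + 1) + c from by omega]
    exact ih (i+1) _ (by omega) (by rw [h1, show i * m + 0 + m = (i + 1) * m from by ring])

-- ===== VERDICT (by name: the statement is the Claim_ definition above) =====
theorem interleaving_spec : Claim_equal_interleaving := by
  intro seqOfChars matrizSize _
  unfold Spec_interleaving
  by_cases hle : matrizSize ≤ 0
  · rw [interleaving_alt, if_pos hle]
    simp [interleaving, Int.toNat_of_nonpos hle, pvA_outer]
  · have hM : 0 < matrizSize.toNat := by omega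
    have hmx : ∀ y i, y < matrizSize.toNat → i < matrizSize.toNat →
        (((pvA_buildMx seqOfChars.toList matrizSize.toNat matrizSize.toNat 0).getD y []).getD i ' ')
          = pvCell seqOfChars.toList (y * matrizSize.toNat + i) := by
      intro y i hy hi
      simpa using pvA_mx_get seqOfChars.toList matrizSize.toNat matrizSize.toNat 0 y i hy hi
    have houter := pvA_outer_eq seqOfChars.toList matrizSize.toNat _ hmx
      matrizSize.toNat 0 [] (by omega) (by simp)
    rw [interleaving_alt, if_neg hle]
    simp only [interleaving]
    rw [houter]
    simp [Nat.min_comm]
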